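-- pv_equiv track=rewrite | github.com/lfreeman5/AI_projects | 2048/old.py | collapse_right
-- ===== SOURCE A (Python) =====
-- def collapse_right(vec):
--     for j in range(1,4):
--         if(vec[j]==0): # move to right hand side getting rid of zeros
--             vec[1:j+1] = vec[:j]
--             vec[0] = 0
--     for j in range(3,0,-1): # match numbers
--         if(vec[j]==vec[j-1]):
--             vec[j]*=2
--             vec[1:j] = vec[0:j-1]
--             vec[0] = 0
--     return vec
-- ===== SOURCE B (Python) =====
-- def _merge_rev(rts):
--     # rts holds the nonzero tiles right-to-left; merge equal adjacent pairs once
--     if not rts: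
--         return []
--     if len(rts) >= 2 and rts[0] == rts[1]:
--         return [2 * rts[0]] + _merge_rev(rts[2:])
--     return [rts[0]] + _merge_rev(rts[1:])
--
-- def collapse_right(vec):
--     tiles = [vec[i] for i in range(4) if vec[i] != 0]
--     merged = _merge_rev(tiles[::-1])
--     merged.reverse()
--     vec[:4] = [0] * (4 - len(merged)) + merged
--     return vec
-- ===== Notes on version B (the rewrite author's own statement) =====
-- stated objective: idiomatic
-- what changed: B extracts the nonzero tiles of the first four slots and does one right-to-left merge pass over that fresh list, then left-pads with zeros, instead of A's two in-place slice-shifting passes over the row.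
import Mathlib
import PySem

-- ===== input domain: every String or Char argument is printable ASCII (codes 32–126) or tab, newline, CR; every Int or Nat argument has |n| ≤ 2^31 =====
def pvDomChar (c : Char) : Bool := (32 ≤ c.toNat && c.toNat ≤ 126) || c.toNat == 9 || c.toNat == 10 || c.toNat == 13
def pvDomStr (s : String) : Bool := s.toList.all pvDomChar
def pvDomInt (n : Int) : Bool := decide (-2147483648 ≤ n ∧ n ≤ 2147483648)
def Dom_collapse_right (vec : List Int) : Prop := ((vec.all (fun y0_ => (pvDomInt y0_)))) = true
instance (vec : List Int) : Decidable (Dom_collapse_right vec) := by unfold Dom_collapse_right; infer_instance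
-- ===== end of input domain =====

-- B replaces A's two in-place slice-shifting passes by a single compact-then-merge pass over
-- the extracted nonzero tiles (idiomatic; same cost). Both Pythons mutate vec's first four
-- slots identically on admitted inputs; the theorem is about the returned value.

-- ===== PORT A =====
-- Python slice assignment vec[a:b] = r with a ≤ b in range and |r| = b - a
def pvAssignSlice (v : List Int) (a b : Nat) (r : List Int) : List Int :=
  v.take a ++ r ++ v.drop b

-- one iteration of the first loop (j ∈ {1,2,3}): vec[j]==0 → vec[1:j+1]=vec[:j]; vec[0]=0
def pvZeroStep (v : List Int) (j : Nat) : List Int :=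
  if PySem.List.pyGetD v (j : Int) 0 = 0 then
    (pvAssignSlice v 1 (j + 1) (v.take j)).set 0 0
  else v

-- one iteration of the second loop (j ∈ {3,2,1}): vec[j]==vec[j-1] → merge and shift
def pvMergeStep (v : List Int) (j : Nat) : List Int :=
  if PySem.List.pyGetD v (j : Int) 0 = PySem.List.pyGetD v ((j : Int) - 1) 0 then
    let v' := v.set j (2 * PySem.List.pyGetD v (j : Int) 0)
    (pvAssignSlice v' 1 j (v'.take (j - 1))).set 0 0
  else v

def collapse_right (vec : List Int) : List Int :=
  let v := [1, 2, 3].foldl pvZeroStep vec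
  [3, 2, 1].foldl pvMergeStep v

-- ===== PORT B =====
-- _merge_rev: tiles right-to-left, merge equal adjacent pairs once
def pvMergeRev : List Int → List Int
  | [] => []
  | [a] => [a]
  | a :: b :: rest =>
    if a = b then (2 * a) :: pvMergeRev rest
    else a :: pvMergeRev (b :: rest)

def collapse_right_alt (vec : List Int) : List Int :=
  let tiles := (PySem.List.pyRange 0 4 1).foldl
    (fun acc i => if PySem.List.pyGetD vec i 0 ≠ 0 then acc ++ [PySem.List.pyGetD vec i 0] else acc) []
  let merged := (pvMergeRev tiles.reverse).reverse
  (List.replicate (4 - merged.length) 0 ++ merged) ++ vec.drop 4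

-- ===== PRECONDITION & SPEC =====
-- Both programs index the first four slots, so each raises IndexError on lists shorter than four.
def Pre_collapse_right (vec : List Int) : Prop := 4 ≤ vec.length
instance (vec : List Int) : Decidable (Pre_collapse_right vec) := by
  unfold Pre_collapse_right; infer_instance

def pvWitness_collapse_right : List Int := [2, 0, 2, 4]

def Spec_collapse_right (vec : List Int) (out : List Int) : Prop := out = collapse_right_alt vec
instance (vec : List Int) (out : List Int) : Decidable (Spec_collapse_right vec out) := by
  unfold Spec_collapse_right; infer_instance

-- ===== CLAIM (what is proved, stated in full; the proofs are below) =====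
def Claim_equal_collapse_right : Prop :=
  ∀ (vec : List Int), Dom_collapse_right vec → Pre_collapse_right vec →
    Spec_collapse_right vec (collapse_right vec)

-- ===== LEMMAS AND PROOFS =====
set_option maxHeartbeats 2000000 in
theorem pvTilesFold (a b c d : Int) (r : List Int) :
    (PySem.List.pyRange 0 4 1).foldl
      (fun acc i => if PySem.List.pyGetD (a :: b :: c :: d :: r) i 0 ≠ 0
                    then acc ++ [PySem.List.pyGetD (a :: b :: c :: d :: r) i 0] else acc) []
      = List.filter (fun x => x ≠ 0) [a, b, c, d] := by
  have hr : PySem.List.pyRange 0 4 1 = [0, 1, 2, 3] := by decide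
  have h0 : (0:Int) ≤ (r.length:Int) + 1 + 1 + 1 + 1 := by omega
  have h1 : (1:Int) ≤ (r.length:Int) + 1 + 1 + 1 + 1 := by omega
  have h2 : (2:Int) ≤ (r.length:Int) + 1 + 1 + 1 + 1 := by omega
  have h3 : (3:Int) ≤ (r.length:Int) + 1 + 1 + 1 + 1 := by omega
  rw [hr]
  norm_num [List.foldl, PySem.List.pyGetD, PySem.List.pyGet?, PySem.List.pyIdx?, h0, h1, h2, h3,
    show Int.toNat 0 = 0 from rfl, show Int.toNat 1 = 1 from rfl,
    show Int.toNat 2 = 2 from rfl, show Int.toNat 3 = 3 from rfl,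
    List.getElem_cons_succ, List.getElem_cons_zero, List.filter]
  split_ifs
  all_goals try omega
  all_goals simp_all

theorem pvZeroStep1 (a b c d : Int) (r : List Int) :
    pvZeroStep (a :: b :: c :: d :: r) 1 = if b = 0 then 0 :: a :: c :: d :: r else a :: b :: c :: d :: r := by
  have h0 : (0:Int) ≤ (r.length:Int) + 1 + 1 := by omega
  have h2 : (2:Int) ≤ (r.length:Int) + 1 + 1 + 1 := by omega
  have h3 : (3:Int) ≤ (r.length:Int) + 1 + 1 + 1 := by omega
  norm_num [pvZeroStep, pvAssignSlice, PySem.List.pyGetD, PySem.List.pyGet?, PySem.List.pyIdx?, h0, h2, h3, show Int.toNat 2 = 2 from rfl, show Int.toNat 3 = 3 from rfl, List.getElem_cons_succ, List.getElem_cons_zero]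

theorem pvZeroStep2 (a b c d : Int) (r : List Int) :
    pvZeroStep (a :: b :: c :: d :: r) 2 = if c = 0 then 0 :: a :: b :: d :: r else a :: b :: c :: d :: r := by
  have h0 : (0:Int) ≤ (r.length:Int) + 1 + 1 := by omega
  have h2 : (2:Int) ≤ (r.length:Int) + 1 + 1 + 1 := by omega
  have h3 : (3:Int) ≤ (r.length:Int) + 1 + 1 + 1 := by omega
  norm_num [pvZeroStep, pvAssignSlice, PySem.List.pyGetD, PySem.List.pyGet?, PySem.List.pyIdx?, h0, h2, h3, show Int.toNat 2 = 2 from rfl, show Int.toNat 3 = 3 from rfl, List.getElem_cons_succ, List.getElem_cons_zero]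

theorem pvZeroStep3 (a b c d : Int) (r : List Int) :
    pvZeroStep (a :: b :: c :: d :: r) 3 = if d = 0 then 0 :: a :: b :: c :: r else a :: b :: c :: d :: r := by
  have h0 : (0:Int) ≤ (r.length:Int) + 1 + 1 := by omega
  have h2 : (2:Int) ≤ (r.length:Int) + 1 + 1 + 1 := by omega
  have h3 : (3:Int) ≤ (r.length:Int) + 1 + 1 + 1 := by omega
  norm_num [pvZeroStep, pvAssignSlice, PySem.List.pyGetD, PySem.List.pyGet?, PySem.List.pyIdx?, h0, h2, h3, show Int.toNat 2 = 2 from rfl, show Int.toNat 3 = 3 from rfl, List.getElem_cons_succ, List.getElem_cons_zero]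

theorem pvMergeStep3 (a b c d : Int) (r : List Int) :
    pvMergeStep (a :: b :: c :: d :: r) 3 = if d = c then 0 :: a :: b :: (2 * d) :: r else a :: b :: c :: d :: r := by
  have h0 : (0:Int) ≤ (r.length:Int) + 1 + 1 := by omega
  have h0' : (0:Int) ≤ (r.length:Int) + 1 + 1 + 1 := by omega
  have h2 : (2:Int) ≤ (r.length:Int) + 1 + 1 + 1 := by omega
  have h3 : (3:Int) ≤ (r.length:Int) + 1 + 1 + 1 := by omega
  norm_num [pvMergeStep, h0', pvAssignSlice, PySem.List.pyGetD, PySem.List.pyGet?, PySem.List.pyIdx?, h0, h2, h3, show Int.toNat 2 = 2 from rfl, show Int.toNat 3 = 3 from rfl, List.getElem_cons_succ, List.getElem_cons_zero]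

theorem pvMergeStep2 (a b c d : Int) (r : List Int) :
    pvMergeStep (a :: b :: c :: d :: r) 2 = if c = b then 0 :: a :: (2 * c) :: d :: r else a :: b :: c :: d :: r := by
  have h0 : (0:Int) ≤ (r.length:Int) + 1 + 1 := by omega
  have h0' : (0:Int) ≤ (r.length:Int) + 1 + 1 + 1 := by omega
  have h2 : (2:Int) ≤ (r.length:Int) + 1 + 1 + 1 := by omega
  have h3 : (3:Int) ≤ (r.length:Int) + 1 + 1 + 1 := by omega
  norm_num [pvMergeStep, h0', pvAssignSlice, PySem.List.pyGetD, PySem.List.pyGet?, PySem.List.pyIdx?, h0, h2, h3, show Int.toNat 2 = 2 from rfl, show Int.toNat 3 = 3 from rfl, List.getElem_cons_succ, List.getElem_cons_zero]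

theorem pvMergeStep1 (a b c d : Int) (r : List Int) :
    pvMergeStep (a :: b :: c :: d :: r) 1 = if b = a then 0 :: (2 * b) :: c :: d :: r else a :: b :: c :: d :: r := by
  have h0 : (0:Int) ≤ (r.length:Int) + 1 + 1 := by omega
  have h0' : (0:Int) ≤ (r.length:Int) + 1 + 1 + 1 := by omega
  have h2 : (2:Int) ≤ (r.length:Int) + 1 + 1 + 1 := by omega
  have h3 : (3:Int) ≤ (r.length:Int) + 1 + 1 + 1 := by omega
  norm_num [pvMergeStep, h0', pvAssignSlice, PySem.List.pyGetD, PySem.List.pyGet?, PySem.List.pyIdx?, h0, h2, h3, show Int.toNat 2 = 2 from rfl, show Int.toNat 3 = 3 from rfl, List.getElem_cons_succ, List.getElem_cons_zero]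

set_option maxHeartbeats 2000000 in
theorem collapse_right_core (a b c d : Int) (rest : List Int) :
    collapse_right (a :: b :: c :: d :: rest) = collapse_right_alt (a :: b :: c :: d :: rest) := by
  simp only [collapse_right, List.foldl]
  simp only [pvZeroStep1, pvZeroStep2, pvZeroStep3, pvMergeStep1, pvMergeStep2, pvMergeStep3,
    apply_ite (fun v => pvZeroStep v 2), apply_ite (fun v => pvZeroStep v 3),
    apply_ite (fun v => pvMergeStep v 3), apply_ite (fun v => pvMergeStep v 2),
    apply_ite (fun v => pvMergeStep v 1)]
  simp only [collapse_right_alt, pvTilesFold, List.filter, List.drop]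
  split_ifs <;> simp_all [pvMergeRev] <;>
    first
      | omega
      | (by_cases ha : a = 0 <;> simp_all [pvMergeRev])

-- ===== VERDICT (by name: the statement is the Claim_ definition above) =====
set_option maxHeartbeats 2000000 in
theorem collapse_right_spec : Claim_equal_collapse_right := by
  intro vec _ hpre
  unfold Spec_collapse_right
  match vec, hpre with
  | a :: b :: c :: d :: rest, _ => exact collapse_right_core a b c d rest
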